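-- pv_equiv track=rewrite | github.com/kfigon/RandomCode | _SPOJ/adventOfCode2020/day6/customsDeclaration.py | countAnswers
-- ===== SOURCE A (Python) =====
-- from typing import List, Dict
--
-- def countAnswers(answersInGroup: str) -> int:
--     d: Dict[str, int] = {}
--     for answer in answersInGroup:
--         if answer in d:
--             d[answer] += 1
--         else:
--             d[answer] = 1
--
--     return len(d)
-- ===== SOURCE B (Python) =====
-- def countAnswers(answersInGroup: str) -> int:
--     count = 0
--     prev = None
--     for c in sorted(answersInGroup):
--         if prev != c:
--             count += 1
--         prev = c
--     return count
-- ===== Notes on version B (the rewrite author's own statement) =====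
-- stated objective: alternative
-- what changed: Replaces the dict-accumulation distinct count with a sort followed by a single adjacent-difference scan (count increments whenever the current character differs from the previous one).
import Mathlib
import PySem

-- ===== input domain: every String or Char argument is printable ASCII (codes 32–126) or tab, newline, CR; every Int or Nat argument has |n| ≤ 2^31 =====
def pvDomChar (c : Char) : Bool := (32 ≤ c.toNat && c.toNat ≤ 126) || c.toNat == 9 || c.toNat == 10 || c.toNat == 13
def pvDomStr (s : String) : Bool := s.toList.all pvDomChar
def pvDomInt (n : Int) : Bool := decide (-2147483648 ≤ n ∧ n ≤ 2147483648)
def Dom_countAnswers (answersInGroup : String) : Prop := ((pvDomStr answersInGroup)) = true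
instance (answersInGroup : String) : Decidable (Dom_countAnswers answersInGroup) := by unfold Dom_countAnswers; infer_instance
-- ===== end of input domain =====

-- B replaces A's dict accumulation with sort + one adjacent-difference scan (alternative decomposition, same result).
-- ===== PORT A =====
def countAnswers (answersInGroup : String) : Int :=
  ((answersInGroup.toList.foldl
      (fun (d : PySem.Dict Char Int) answer =>
        if d.contains answer then d.insert answer (d.getD answer 0 + 1)
        else d.insert answer 1)
      PySem.Dict.empty).size : Int)

-- ===== PORT B =====
def countAnswers_alt (answersInGroup : String) : Int :=
  ((PySem.List.sorted answersInGroup.toList (fun c => c) false).foldl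
      (fun (st : Int × Option Char) c =>
        (if st.2 = some c then st.1 else st.1 + 1, some c))
      (0, none)).1

-- ===== PRECONDITION & SPEC =====
def Spec_countAnswers (answersInGroup : String) (out : Int) : Prop := out = countAnswers_alt answersInGroup
instance (answersInGroup : String) (out : Int) : Decidable (Spec_countAnswers answersInGroup out) := by unfold Spec_countAnswers; infer_instance

-- ===== CLAIM (what is proved, stated in full; the proofs are below) =====
def Claim_equal_countAnswers : Prop := ∀ (answersInGroup : String), Dom_countAnswers answersInGroup → Spec_countAnswers answersInGroup (countAnswers answersInGroup)

-- ===== LEMMAS AND PROOFS =====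

-- ===== VERDICT (by name: the statement is the Claim_ definition above) =====
-- A's fold: both branches are inserts of the same key
theorem foldA_eq_insert :
    (fun (d : PySem.Dict Char Int) answer =>
        if d.contains answer then d.insert answer (d.getD answer 0 + 1)
        else d.insert answer 1)
    = (fun (d : PySem.Dict Char Int) answer =>
        d.insert answer (if d.contains answer then d.getD answer 0 + 1 else 1)) := by
  funext d c; split <;> rfl

theorem countAnswers_eq_ofList_length (s : String) :
    countAnswers s = ((PySem.Set.ofList s.toList).length : Int) := by
  unfold countAnswers
  rw [foldA_eq_insert]
  have hsz : ∀ (d : PySem.Dict Char Int), d.size = d.keys.length := by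
    intro d; simp [PySem.Dict.size, PySem.Dict.keys]
  rw [hsz, PySem.Dict.keys_foldl_insert, PySem.Dict.keys_empty, PySem.Set.update_nil_left]

theorem foldB_some (l : List Char) (p : Char) (n : Int)
    (hp : l.Pairwise (· ≤ ·)) (hle : ∀ x ∈ l, p ≤ x) :
    (l.foldl (fun (st : Int × Option Char) c =>
        (if st.2 = some c then st.1 else st.1 + 1, some c)) (n, some p)).1
      = n + ((p :: l).toFinset.card : Int) - 1 := by
  induction l generalizing p n with
  | nil => simp
  | cons c rest ih =>
    rcases List.pairwise_cons.1 hp with ⟨hc, hrest⟩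
    by_cases hpc : p = c
    · subst hpc
      have e : ((if ((n : Int), some p).2 = some p then (n, some p).1 else (n, some p).1 + 1,
          (some p : Option Char)) : Int × Option Char) = (n, some p) := by simp
      rw [List.foldl_cons, e, ih p n hrest hc]
      simp [List.toFinset_cons]
    · have e : ((if ((n : Int), some p).2 = some c then (n, some p).1 else (n, some p).1 + 1,
          (some c : Option Char)) : Int × Option Char) = (n + 1, some c) := by simp [hpc]
      rw [List.foldl_cons, e, ih c (n + 1) hrest hc]
      have hplt : ∀ x ∈ c :: rest, p < x := by
        intro x hx
        rcases List.mem_cons.1 hx with h | h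
        · exact h ▸ lt_of_le_of_ne (hle c List.mem_cons_self) hpc
        · exact lt_of_lt_of_le (lt_of_le_of_ne (hle c List.mem_cons_self) hpc) (hc x h)
      have hpnot : p ∉ (c :: rest).toFinset := by
        intro hmem
        exact lt_irrefl p (hplt p (List.mem_toFinset.1 hmem))
      have hcard : ((p :: c :: rest).toFinset.card : Int) = ((c :: rest).toFinset.card : Int) + 1 := by
        rw [List.toFinset_cons, Finset.card_insert_of_notMem hpnot]
        push_cast; ring
      rw [hcard]; ring

theorem ofList_length_eq_card (l : List Char) :
    (PySem.Set.ofList l).length = l.toFinset.card := by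
  have hnd : (PySem.Set.ofList l).Nodup := PySem.Set.nodup_ofList l
  have hfs : (PySem.Set.ofList l).toFinset = l.toFinset := by
    apply Finset.ext
    intro x
    simp [List.mem_toFinset, PySem.Set.mem_ofList]
  rw [← List.toFinset_card_of_nodup hnd, hfs]

theorem countAnswers_alt_eq (s : String) :
    countAnswers_alt s = ((PySem.Set.ofList s.toList).length : Int) := by
  unfold countAnswers_alt
  rw [ofList_length_eq_card]
  have hperm : (PySem.List.sorted s.toList (fun c => c) false).Perm s.toList :=
    PySem.List.sorted_perm _ _ _
  have hpw : (PySem.List.sorted s.toList (fun c => c) false).Pairwise (· ≤ ·) :=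
    PySem.List.sorted_pairwise _ _
  have hfs : (PySem.List.sorted s.toList (fun c => c) false).toFinset = s.toList.toFinset := by
    apply Finset.ext
    intro x
    simp [List.mem_toFinset, hperm.mem_iff]
  rw [← hfs]
  cases hs : PySem.List.sorted s.toList (fun c => c) false with
  | nil => simp
  | cons c rest =>
    rw [hs] at hpw
    rcases List.pairwise_cons.1 hpw with ⟨hc, hrest⟩
    have e : ((if ((0 : Int), (none : Option Char)).2 = some c then ((0 : Int), (none : Option Char)).1
        else ((0 : Int), (none : Option Char)).1 + 1, (some c : Option Char)) : Int × Option Char)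
        = (1, some c) := by simp
    rw [List.foldl_cons, e, foldB_some rest c 1 hrest hc]
    ring

theorem countAnswers_spec : Claim_equal_countAnswers := by
  intro s _
  unfold Spec_countAnswers
  rw [countAnswers_eq_ofList_length, countAnswers_alt_eq]
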